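-- pv_equiv track=rewrite | github.com/990aa/cryptex | src/cryptex/solvers/vigenere.py | _kasiski_distances
-- ===== SOURCE A (Python) =====
-- import string
--
-- def _letters_only(text: str) -> str:
--     return "".join(ch for ch in text if ch in string.ascii_lowercase)
--
-- def _kasiski_distances(ciphertext: str, ngram_len: int = 3) -> list[int]:
--     letters = _letters_only(ciphertext)
--     positions: dict[str, list[int]] = {}
--     for i in range(len(letters) - ngram_len + 1):
--         gram = letters[i : i + ngram_len]
--         positions.setdefault(gram, []).append(i)
--
--     gaps: list[int] = []
--     for poslist in positions.values():
--         if len(poslist) >= 2: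
--             for i in range(len(poslist) - 1):
--                 gaps.append(poslist[i + 1] - poslist[i])
--     return gaps
-- ===== SOURCE B (Python) =====
-- import string
--
-- def _kasiski_distances(ciphertext: str, ngram_len: int = 3) -> list[int]:
--     # Dict-free nested scan: for each position that is the first occurrence of its
--     # n-gram, rescan the rest of the gram list for its later occurrences and emit
--     # the consecutive gaps; first-appearance grouping order is preserved.
--     letters = "".join(ch for ch in ciphertext if ch in string.ascii_lowercase)
--     n = len(letters) - ngram_len + 1
--     grams = [letters[i:i + ngram_len] for i in range(n)]
--     out: list[int] = []
--     for i in range(n):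
--         g = grams[i]
--         if grams.index(g) != i:
--             continue  # not the first occurrence of this gram
--         prev = i
--         for j in range(i + 1, n):
--             if grams[j] == g:
--                 out.append(j - prev)
--                 prev = j
--     return out
-- ===== Notes on version B (the rewrite author's own statement) =====
-- stated objective: alternative
-- what changed: Replaces A's hash-grouping (dict of position lists, then a differencing pass over the dict values) with a dict-free nested scan: for each position that is the first occurrence of its n-gram (checked with list.index), an inner rescan of the remaining gram list emits the consecutive gaps directly; first-appearance grouping order is preserved because distinct grams in first-occurrence order coincide with dict insertion order.
import Mathlib
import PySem

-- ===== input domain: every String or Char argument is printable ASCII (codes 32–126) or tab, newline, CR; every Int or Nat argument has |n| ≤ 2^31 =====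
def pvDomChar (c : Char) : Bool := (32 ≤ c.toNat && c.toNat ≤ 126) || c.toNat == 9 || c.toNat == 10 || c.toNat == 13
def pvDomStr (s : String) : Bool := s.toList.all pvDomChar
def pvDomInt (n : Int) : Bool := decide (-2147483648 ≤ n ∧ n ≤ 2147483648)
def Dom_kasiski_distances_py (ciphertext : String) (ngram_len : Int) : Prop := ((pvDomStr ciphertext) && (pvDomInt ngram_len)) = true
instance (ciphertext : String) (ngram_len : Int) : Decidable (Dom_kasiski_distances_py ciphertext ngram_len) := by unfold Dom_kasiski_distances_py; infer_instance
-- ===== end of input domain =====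

-- B replaces A's dict-of-position-lists grouping with a dict-free nested scan (first-occurrence check + rescan); alternative decomposition, same output.

-- ===== PORT A =====
-- 'ch in string.ascii_lowercase' for a single character = membership in "abcdefghijklmnopqrstuvwxyz"
def pvAsciiLower : List Char := "abcdefghijklmnopqrstuvwxyz".toList

-- positions.setdefault(gram, []).append(i)  ==  positions[gram] = positions.get(gram, []) + [i]  (Dict.modify)
def kasiski_distances_py (ciphertext : String) (ngram_len : Int) : List Int :=
  let letters : List Char := ciphertext.toList.filter (fun ch => pvAsciiLower.contains ch)
  let positions : PySem.Dict (List Char) (List Int) :=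
    (PySem.List.pyRange 0 ((letters.length : Int) - ngram_len + 1) 1).foldl
      (fun d i =>
        let gram := PySem.List.slice letters (some i) (some (i + ngram_len))
        d.modify gram [] (fun pl => pl ++ [i]))
      PySem.Dict.empty
  positions.values.foldl
    (fun gaps poslist =>
      if 2 ≤ poslist.length then
        (PySem.List.pyRange 0 ((poslist.length : Int) - 1) 1).foldl
          (fun g i => g ++ [PySem.List.pyGetD poslist (i + 1) 0 - PySem.List.pyGetD poslist i 0])
          gaps
      else gaps)
    []

-- ===== PORT B =====
def kasiski_distances_py_alt (ciphertext : String) (ngram_len : Int) : List Int :=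
  let letters : List Char := ciphertext.toList.filter (fun ch => pvAsciiLower.contains ch)
  let n : Int := (letters.length : Int) - ngram_len + 1
  let grams : List (List Char) :=
    (PySem.List.pyRange 0 n 1).map
      (fun i => PySem.List.slice letters (some i) (some (i + ngram_len)))
  (PySem.List.pyRange 0 n 1).foldl
    (fun out i =>
      let g := PySem.List.pyGetD grams i []
      -- 'if grams.index(g) != i: continue' — g = grams[i] ∈ grams, so .index never raises;
      -- the Nat index is compared with the Int loop variable as Python compares the ints.
      if (PySem.List.index? grams g).map Int.ofNat ≠ some i then out
      else
        ((PySem.List.pyRange (i + 1) n 1).foldl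
          (fun s j => if PySem.List.pyGetD grams j [] == g then (j, s.2 ++ [j - s.1]) else s)
          (i, out)).2)
    []

-- ===== PRECONDITION & SPEC =====
def Spec_kasiski_distances_py (ciphertext : String) (ngram_len : Int) (out : List Int) : Prop := out = kasiski_distances_py_alt ciphertext ngram_len
instance (ciphertext : String) (ngram_len : Int) (out : List Int) : Decidable (Spec_kasiski_distances_py ciphertext ngram_len out) := by unfold Spec_kasiski_distances_py; infer_instance

-- ===== CLAIM (what is proved, stated in full; the proofs are below) =====
def Claim_equal_kasiski_distances_py : Prop := ∀ (ciphertext : String) (ngram_len : Int), Dom_kasiski_distances_py ciphertext ngram_len → Spec_kasiski_distances_py ciphertext ngram_len (kasiski_distances_py ciphertext ngram_len)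

-- ===== LEMMAS AND PROOFS =====

-- consecutive differences of a position list
def pvDiffs (l : List Int) : List Int := List.zipWith (fun a b => b - a) l l.tail

theorem pvDiffs_cons_cons (a b : Int) (l : List Int) :
    pvDiffs (a :: b :: l) = (b - a) :: pvDiffs (b :: l) := rfl

-- A's inner differencing loop produces exactly pvDiffs
theorem pv_inner_eq (pl : List Int) (acc : List Int) :
    (if 2 ≤ pl.length then
        (PySem.List.pyRange 0 ((pl.length : Int) - 1) 1).foldl
          (fun g i => g ++ [PySem.List.pyGetD pl (i + 1) 0 - PySem.List.pyGetD pl i 0]) acc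
      else acc) = acc ++ pvDiffs pl := by
  by_cases h : 2 ≤ pl.length
  · simp only [h, if_pos]
    rw [PySem.List.foldl_append_singleton_eq_map]
    congr 1
    rw [PySem.List.pyRange_one]
    apply List.ext_getElem
    · simp [pvDiffs]
    · intro k hk1 hk2
      simp only [List.map_map, List.getElem_map, List.getElem_range, Function.comp_apply]
      have hk : k < pl.length - 1 := by
        have : (pvDiffs pl).length = pl.length - 1 := by simp [pvDiffs]
        omega
      have h1 : PySem.List.pyGetD pl ((0 + (k : Int)) + 1) 0 = pl.getD (k + 1) 0 := by
        have : (0 + (k : Int)) + 1 = ((k + 1 : Nat) : Int) := by omega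
        rw [this, PySem.List.pyGetD_natCast]
      have h2 : PySem.List.pyGetD pl (0 + (k : Int)) 0 = pl.getD k 0 := by
        have : (0 + (k : Int)) = ((k : Nat) : Int) := by omega
        rw [this, PySem.List.pyGetD_natCast]
      rw [h1, h2]
      simp [pvDiffs, List.getElem_zipWith, List.getD_eq_getElem?_getD,
        List.getElem?_eq_getElem (by omega : k + 1 < pl.length),
        List.getElem?_eq_getElem (by omega : k < pl.length),
        List.getElem_tail]
  · simp only [h, if_false]
    have : pvDiffs pl = [] := by
      match pl with
      | [] => rfl
      | [a] => rfl
      | a :: b :: t => simp at h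
    simp [this]

-- A's second loop flattens the per-list differences
theorem pv_final (L : List (List Int)) (acc : List Int) :
    L.foldl
      (fun gaps poslist =>
        if 2 ≤ poslist.length then
          (PySem.List.pyRange 0 ((poslist.length : Int) - 1) 1).foldl
            (fun g i => g ++ [PySem.List.pyGetD poslist (i + 1) 0 - PySem.List.pyGetD poslist i 0])
            gaps
        else gaps)
      acc
      = acc ++ (L.map pvDiffs).flatten := by
  induction L generalizing acc with
  | nil => simp
  | cons a t ih =>
    rw [List.foldl_cons, pv_inner_eq a acc, ih]
    simp

-- B's inner rescan produces the consecutive differences of the matching positions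
theorem pv_inner_scan (P : Int → Bool) (js : List Int) (prev : Int) (out : List Int) :
    (js.foldl (fun s j => if P j then (j, s.2 ++ [j - s.1]) else s) (prev, out)).2
      = out ++ pvDiffs (prev :: js.filter P) := by
  induction js generalizing prev out with
  | nil => simp [pvDiffs]
  | cons j t ih =>
    simp only [List.foldl_cons, List.filter_cons]
    by_cases h : P j
    · simp only [h, if_pos]
      rw [ih j (out ++ [j - prev]), pvDiffs_cons_cons]
      simp
    · simp only [h, if_neg, Bool.false_eq_true, not_false_iff]
      exact ih prev out

-- flatten of a guarded map = flatten of the map over the filtered list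
theorem pv_flatten_ite {α : Type} (l : List α) (p : α → Bool) (F : α → List Int) :
    ((l.filter p).map F).flatten = (l.map (fun x => if p x then F x else [])).flatten := by
  induction l with
  | nil => rfl
  | cons x t ih =>
    simp only [List.filter_cons, List.map_cons]
    by_cases h : p x <;> simp [h, ih]

-- the distinct grams in first-appearance order are the grams at first-occurrence indices
theorem pv_dedup_filter (gl : List (List Char)) :
    PySem.Set.ofList gl
      = ((List.range gl.length).filter
          (fun k => PySem.List.index? gl (gl.getD k []) = some k)).map (fun k => gl.getD k []) := by
  induction gl using List.reverseRecOn with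
  | nil => simp
  | append_singleton gl a ih =>
    rw [PySem.Set.ofList_append_singleton, List.length_append, List.length_singleton,
      List.range_succ, List.filter_append, List.map_append]
    have hpred : ∀ k ∈ List.range gl.length,
        (decide (PySem.List.index? (gl ++ [a]) ((gl ++ [a]).getD k []) = some k))
          = (decide (PySem.List.index? gl (gl.getD k []) = some k)) := by
      intro k hk
      rw [List.mem_range] at hk
      have hgd : (gl ++ [a]).getD k [] = gl.getD k [] := by
        rw [List.getD_eq_getElem?_getD, List.getD_eq_getElem?_getD,
          List.getElem?_append_left hk]
      have hmem : gl.getD k [] ∈ gl := by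
        rw [List.getD_eq_getElem?_getD, List.getElem?_eq_getElem hk]
        exact List.getElem_mem hk
      rw [hgd, PySem.List.index?_append_of_mem [a] hmem]
    have hfilter : (List.range gl.length).filter
          (fun k => PySem.List.index? (gl ++ [a]) ((gl ++ [a]).getD k []) = some k)
        = (List.range gl.length).filter
          (fun k => PySem.List.index? gl (gl.getD k []) = some k) := by
      exact List.filter_congr hpred
    have hmap : ((List.range gl.length).filter
          (fun k => PySem.List.index? gl (gl.getD k []) = some k)).map
            (fun k => (gl ++ [a]).getD k [])
        = ((List.range gl.length).filter
          (fun k => PySem.List.index? gl (gl.getD k []) = some k)).map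
            (fun k => gl.getD k []) := by
      apply List.map_congr_left
      intro k hk
      have hklt : k < gl.length := by
        have := List.mem_filter.mp hk
        exact List.mem_range.mp this.1
      rw [List.getD_eq_getElem?_getD, List.getD_eq_getElem?_getD,
        List.getElem?_append_left hklt]
    have hlast : (gl ++ [a]).getD gl.length [] = a := by
      rw [List.getD_eq_getElem?_getD, List.getElem?_append_right (le_refl _)]
      simp
    by_cases hmem : a ∈ gl
    · have hidx : PySem.List.index? (gl ++ [a]) a = PySem.List.index? gl a :=
        PySem.List.index?_append_of_mem [a] hmem
      have hne : ¬ (PySem.List.index? (gl ++ [a]) a = some gl.length) := by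
        rw [hidx]
        intro hcontra
        obtain ⟨hk, -, -⟩ := PySem.List.getElem_of_index?_eq_some hcontra
        omega
      have hsingle : ([gl.length].filter
          (fun k => PySem.List.index? (gl ++ [a]) ((gl ++ [a]).getD k []) = some k)) = [] := by
        rw [PySem.List.index?_eq_idxOf?] at hne
        simp [hne]
      rw [hfilter, hmap, hsingle, List.map_nil, List.append_nil, ← ih,
        PySem.Set.add_of_mem]
      rw [PySem.Set.mem_ofList]
      exact hmem
    · have hidx : PySem.List.index? (gl ++ [a]) a = some gl.length :=
        PySem.List.index?_append_singleton_self gl a hmem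
      have hsingle : ([gl.length].filter
          (fun k => PySem.List.index? (gl ++ [a]) ((gl ++ [a]).getD k []) = some k))
            = [gl.length] := by
        rw [PySem.List.index?_eq_idxOf?] at hidx
        simp [hidx]
      rw [hfilter, hmap, hsingle, List.map_singleton, hlast, ← ih,
        PySem.Set.add_of_not_mem]
      rw [PySem.Set.mem_ofList]
      exact hmem

-- the two programs agree for every letters list and gram length
theorem pv_core (L : List Char) (ng : Int) :
    (let positions : PySem.Dict (List Char) (List Int) :=
      (PySem.List.pyRange 0 ((L.length : Int) - ng + 1) 1).foldl
        (fun d i =>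
          let gram := PySem.List.slice L (some i) (some (i + ng))
          d.modify gram [] (fun pl => pl ++ [i]))
        PySem.Dict.empty
     positions.values.foldl
      (fun gaps poslist =>
        if 2 ≤ poslist.length then
          (PySem.List.pyRange 0 ((poslist.length : Int) - 1) 1).foldl
            (fun g i => g ++ [PySem.List.pyGetD poslist (i + 1) 0 - PySem.List.pyGetD poslist i 0])
            gaps
        else gaps)
      [])
    =
    (let n : Int := (L.length : Int) - ng + 1
     let grams : List (List Char) :=
      (PySem.List.pyRange 0 n 1).map
        (fun i => PySem.List.slice L (some i) (some (i + ng)))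
     (PySem.List.pyRange 0 n 1).foldl
      (fun out i =>
        let g := PySem.List.pyGetD grams i []
        if (PySem.List.index? grams g).map Int.ofNat ≠ some i then out
        else
          ((PySem.List.pyRange (i + 1) n 1).foldl
            (fun s j => if PySem.List.pyGetD grams j [] == g then (j, s.2 ++ [j - s.1]) else s)
            (i, out)).2)
      []) := by
  simp only []
  set n : Int := (L.length : Int) - ng + 1 with hn
  set grams : List (List Char) := (PySem.List.pyRange 0 n 1).map
      (fun i => PySem.List.slice L (some i) (some (i + ng))) with hgrams
  -- A-side: the dict is grouping by gram; its values are the per-gram position lists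
  set dA : PySem.Dict (List Char) (List Int) := (PySem.List.pyRange 0 n 1).foldl
      (fun d i => d.modify (PySem.List.slice L (some i) (some (i + ng))) [] fun pl => pl ++ [i])
      PySem.Dict.empty with hdA
  have hnd : dA.keys.Nodup := by
    rw [hdA]
    exact PySem.Dict.nodup_keys_foldl_modify_key (PySem.List.pyRange 0 n 1)
      (fun i => PySem.List.slice L (some i) (some (i + ng))) []
      (fun _ i pl => pl ++ [i]) PySem.Dict.empty PySem.Dict.nodup_keys_empty
  have hkeys : dA.keys = PySem.Set.ofList grams := by
    rw [hdA, PySem.Dict.keys_foldl_modify_key, PySem.Dict.keys_empty,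
      PySem.Set.update_nil_left, hgrams]
  have hget : ∀ g : List Char, dA.getD g []
      = (PySem.List.pyRange 0 n 1).filter
          (fun i => PySem.List.slice L (some i) (some (i + ng)) == g) := by
    intro g
    have hmapfold : dA = ((PySem.List.pyRange 0 n 1).map
        (fun i => ((PySem.List.slice L (some i) (some (i + ng)), i) : List Char × Int))).foldl
        (fun d p => d.modify p.1 [] (fun pl => pl ++ [p.2])) PySem.Dict.empty := by
      rw [hdA, List.foldl_map]
    rw [hmapfold, PySem.Dict.getD_foldl_modify_append, PySem.Dict.getD_empty,
      List.filter_map, List.map_map]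
    simp [Function.comp_def]
  have hA : (dA.values.foldl
      (fun gaps poslist =>
        if 2 ≤ poslist.length then
          (PySem.List.pyRange 0 ((poslist.length : Int) - 1) 1).foldl
            (fun g i => g ++ [PySem.List.pyGetD poslist (i + 1) 0 - PySem.List.pyGetD poslist i 0])
            gaps
        else gaps)
      [])
      = ((PySem.Set.ofList grams).map (fun g => pvDiffs ((PySem.List.pyRange 0 n 1).filter
          (fun i => PySem.List.slice L (some i) (some (i + ng)) == g)))).flatten := by
    rw [pv_final, PySem.Dict.values_eq_map_keys dA hnd [], hkeys, List.map_map,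
      List.nil_append]
    congr 1
    apply List.map_congr_left
    intro g _
    simp only [Function.comp_apply]
    rw [hget g]
  rw [hA]
  -- B-side: each first-occurrence index contributes the diffs of its gram's positions
  have hbody : ∀ (out : List Int) (i : Int),
      (if Option.map Int.ofNat (PySem.List.index? grams (PySem.List.pyGetD grams i [])) ≠ some i
        then out
        else
          ((PySem.List.pyRange (i + 1) n 1).foldl
            (fun s j => if PySem.List.pyGetD grams j [] == PySem.List.pyGetD grams i []
              then (j, s.2 ++ [j - s.1]) else s)
            (i, out)).2)
      = out ++
        (if Option.map Int.ofNat (PySem.List.index? grams (PySem.List.pyGetD grams i [])) ≠ some i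
          then []
          else pvDiffs (i :: (PySem.List.pyRange (i + 1) n 1).filter
            (fun j => PySem.List.pyGetD grams j [] == PySem.List.pyGetD grams i []))) := by
    intro out i
    by_cases hg : Option.map Int.ofNat (PySem.List.index? grams (PySem.List.pyGetD grams i [])) = some i
    · rw [if_neg (not_not_intro hg), if_neg (not_not_intro hg),
        pv_inner_scan (fun j => PySem.List.pyGetD grams j [] == PySem.List.pyGetD grams i [])]
    · rw [if_pos hg, if_pos hg, List.append_nil]
  have hB : ((PySem.List.pyRange 0 n 1).foldl
      (fun out i =>
        if Option.map Int.ofNat (PySem.List.index? grams (PySem.List.pyGetD grams i [])) ≠ some i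
          then out
        else
          ((PySem.List.pyRange (i + 1) n 1).foldl
            (fun s j => if PySem.List.pyGetD grams j [] == PySem.List.pyGetD grams i []
              then (j, s.2 ++ [j - s.1]) else s)
            (i, out)).2)
      [])
      = ((PySem.List.pyRange 0 n 1).map
          (fun i =>
            if Option.map Int.ofNat (PySem.List.index? grams (PySem.List.pyGetD grams i [])) ≠ some i
              then []
            else pvDiffs (i :: (PySem.List.pyRange (i + 1) n 1).filter
              (fun j => PySem.List.pyGetD grams j [] == PySem.List.pyGetD grams i [])))).flatten := by
    rw [PySem.List.foldl_congr_mem _ _ _ _ (fun acc x _ => hbody acc x),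
      PySem.List.foldl_append_eq_flatMap, List.nil_append, List.flatMap_def]
  rw [hB]
  rw [pv_dedup_filter grams, List.map_map, pv_flatten_ite]
  conv_rhs => rw [PySem.List.pyRange_one 0 n, List.map_map]
  have hM : grams.length = (n - 0).toNat := by
    rw [hgrams, List.length_map, PySem.List.length_pyRange_one]
  rw [hM]
  congr 1
  apply List.map_congr_left
  intro k hk
  have hkM : k < (n - 0).toNat := List.mem_range.mp hk
  have hkn : (k : Int) < n := by omega
  have hkg : k < grams.length := by omega
  simp only [Function.comp_apply, zero_add]
  have hgetdk : PySem.List.pyGetD grams ((k : Int)) [] = grams.getD k [] :=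
    PySem.List.pyGetD_natCast grams k []
  have hgramk : grams.getD k [] = PySem.List.slice L (some (k : Int)) (some ((k : Int) + ng)) := by
    rw [List.getD_eq_getElem?_getD, hgrams, List.getElem?_map, PySem.List.getElem?_pyRange_one,
      if_pos (by omega : k < (n - 0).toNat), Option.map_some, Option.getD_some, zero_add]
  by_cases hG : PySem.List.index? grams (grams.getD k []) = some k
  · have hcond : ¬ (Option.map Int.ofNat
        (PySem.List.index? grams (PySem.List.pyGetD grams ((k : Int)) [])) ≠ some ((k : Int))) := by
      rw [hgetdk, hG]
      simp
    rw [if_neg hcond]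
    simp only [hG, decide_true, if_true]
    congr 1
    -- the full occurrence list of gram k splits as k followed by its later occurrences
    have hfr : List.filter
          (fun j => PySem.List.pyGetD grams j [] == PySem.List.pyGetD grams ((k : Int)) [])
          (PySem.List.pyRange ((k : Int) + 1) n)
        = List.filter
          (fun j => PySem.List.slice L (some j) (some (j + ng)) == grams.getD k [])
          (PySem.List.pyRange ((k : Int) + 1) n) := by
      apply List.filter_congr
      intro j hj
      rw [PySem.List.mem_pyRange_one] at hj
      rw [hgetdk, hgrams, PySem.List.pyGetD_map_pyRange_of_nonneg _ n j [] (by omega) hj.2]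
    obtain ⟨hklt, hkv, hprev⟩ := PySem.List.getElem_of_index?_eq_some hG
    have hnil : List.filter
          (fun i => PySem.List.slice L (some i) (some (i + ng)) == grams.getD k [])
          (PySem.List.pyRange 0 ((k : Int))) = [] := by
      rw [List.filter_eq_nil_iff]
      intro j hj
      rw [PySem.List.mem_pyRange_one] at hj
      have hj0 : 0 ≤ j := hj.1
      have hjk : j.toNat < k := by omega
      have hjg : j.toNat < grams.length := by omega
      have hgj : grams.getD j.toNat [] = PySem.List.slice L (some j) (some (j + ng)) := by
        rw [List.getD_eq_getElem?_getD, hgrams, List.getElem?_map,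
          PySem.List.getElem?_pyRange_one, if_pos (by omega : j.toNat < (n - 0).toNat)]
        simp [Int.toNat_of_nonneg hj0]
      have hne : grams.getD j.toNat [] ≠ grams.getD k [] := by
        rw [List.getD_eq_getElem?_getD, List.getElem?_eq_getElem hjg, Option.getD_some]
        exact hprev j.toNat hjk
      rw [hgj] at hne
      simpa using hne
    have hsing : List.filter
          (fun i => PySem.List.slice L (some i) (some (i + ng)) == grams.getD k [])
          [((k : Int))] = [((k : Int))] := by
      rw [show grams.getD k [] = PySem.List.slice L (some (k : Int)) (some ((k : Int) + ng))
        from hgramk]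
      simp
    rw [PySem.List.pyRange_one_append 0 ((k : Int) + 1) n (by omega) (by omega),
      List.filter_append,
      PySem.List.pyRange_one_succ_right (Int.natCast_nonneg k),
      List.filter_append, hnil, hsing, hfr]
    simp
  · have hcond : Option.map Int.ofNat
        (PySem.List.index? grams (PySem.List.pyGetD grams ((k : Int)) [])) ≠ some ((k : Int)) := by
      rw [hgetdk]
      cases h : PySem.List.index? grams (grams.getD k []) with
      | none => simp
      | some a =>
        simp only [Option.map_some, ne_eq, Option.some.injEq]
        intro hc
        exact hG (by rw [h, Int.ofNat_inj.mp hc])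
    rw [if_pos hcond, if_neg (by simpa using hG)]

-- ===== VERDICT (by name: the statement is the Claim_ definition above) =====
theorem kasiski_distances_py_spec : Claim_equal_kasiski_distances_py := by
  intro ciphertext ngram_len _
  unfold Spec_kasiski_distances_py kasiski_distances_py kasiski_distances_py_alt
  exact pv_core (ciphertext.toList.filter (fun ch => pvAsciiLower.contains ch)) ngram_len
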